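-- pv_equiv track=rewrite | github.com/PigBun-AI/aimoda | backend/app/services/chat_reference_service.py | _extract_filter_phrase_candidates
-- ===== SOURCE A (Python) =====
-- def _dedupe_phrases(phrases: list[str]) -> list[str]:
--     seen: set[str] = set()
--     deduped: list[str] = []
--     for raw in phrases:
--         phrase = str(raw or "").strip()
--         if len(phrase) < 2:
--             continue
--         normalized = phrase.casefold()
--         if normalized in seen:
--             continue
--         seen.add(normalized)
--         deduped.append(phrase)
--     return deduped
--
-- def _extract_filter_phrase_candidates(filters_applied: list[str]) -> list[str]:
--     phrases: list[str] = []
--     for raw_filter in filters_applied: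
--         filter_entry = str(raw_filter or "").strip()
--         if "=" not in filter_entry:
--             continue
--
--         key, value = filter_entry.split("=", 1)
--         filter_key = key.strip().lower()
--         filter_value = value.strip()
--         if not filter_value:
--             continue
--
--         phrases.append(filter_value)
--         if filter_key == "brand":
--             phrases.extend([
--                 filter_value.title(),
--                 filter_value.upper(),
--                 f"{filter_value.title()} 系列",
--                 f"{filter_value.title()} 的",
--             ])
--         elif filter_key == "quarter":
--             phrases.extend([
--                 f"{filter_value}系列",
--                 f"{filter_value}方向",
--                 f"{filter_value}结果",
--             ])
--
--     return _dedupe_phrases(phrases)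
-- ===== SOURCE B (Python) =====
-- _EXPANSIONS = {
--     "brand": [
--         lambda v: v.title(),
--         lambda v: v.upper(),
--         lambda v: f"{v.title()} 系列",
--         lambda v: f"{v.title()} 的",
--     ],
--     "quarter": [
--         lambda v: f"{v}系列",
--         lambda v: f"{v}方向",
--         lambda v: f"{v}结果",
--     ],
-- }
--
--
-- def _extract_filter_phrase_candidates(filters_applied: list[str]) -> list[str]:
--     seen: set[str] = set()
--     result: list[str] = []
--     for raw_filter in filters_applied:
--         entry = (raw_filter or "").strip()
--         if "=" not in entry:
--             continue
--         key, value = entry.split("=", 1)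
--         value = value.strip()
--         if not value:
--             continue
--         for make in [lambda v: v] + _EXPANSIONS.get(key.strip().lower(), []):
--             phrase = make(value).strip()
--             if len(phrase) < 2:
--                 continue
--             normalized = phrase.casefold()
--             if normalized not in seen:
--                 seen.add(normalized)
--                 result.append(phrase)
--     return result
-- ===== Notes on version B (the rewrite author's own statement) =====
-- stated objective: idiomatic
-- what changed: B replaces A's two-pass build-then-dedupe (explicit key branching plus a separate _dedupe_phrases pass) by a single fused loop that dispatches the extra phrases through a key->callables table and dedupes inline with a seen set of casefolded phrases.
import Mathlib
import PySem

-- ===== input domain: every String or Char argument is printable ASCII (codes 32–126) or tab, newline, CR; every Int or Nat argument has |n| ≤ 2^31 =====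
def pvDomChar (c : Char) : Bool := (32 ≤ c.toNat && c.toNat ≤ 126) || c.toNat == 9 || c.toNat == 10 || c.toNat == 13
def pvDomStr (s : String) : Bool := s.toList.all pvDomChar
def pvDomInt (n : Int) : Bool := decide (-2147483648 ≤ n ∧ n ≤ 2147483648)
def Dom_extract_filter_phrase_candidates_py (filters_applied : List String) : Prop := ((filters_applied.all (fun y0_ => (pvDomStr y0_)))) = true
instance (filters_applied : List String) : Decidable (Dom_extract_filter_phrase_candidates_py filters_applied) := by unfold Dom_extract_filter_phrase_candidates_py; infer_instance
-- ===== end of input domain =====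

-- B fuses the casefold-dedupe into the single build loop and replaces the key branching by a
-- dispatch table of phrase-making functions (idiomatic decomposition; same asymptotic cost).

-- shared port helper: Python str.title(), exact on ASCII (hand-ported; no PySem primitive)
def pvTitleGo : List Char → Bool → List Char
  | [], _ => []
  | c :: rest, prevCased =>
    (if prevCased then PySem.Chars.lowerChar c else PySem.Chars.upperChar c)
      :: pvTitleGo rest (PySem.Chars.isalpha c)

def pvTitle (s : String) : String := String.ofList (pvTitleGo s.toList false)

-- ===== PORT A =====
-- Note: str(raw or "") is the identity on str inputs, ported as the string itself;
-- phrase.casefold() is ported as PySem.Str.lower (identical on the ASCII domain).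
def dedupe_phrases_py (phrases : List String) : List String :=
  (phrases.foldl
    (fun (st : PySem.Set String × List String) raw =>
      let phrase := PySem.Str.strip raw
      if PySem.Str.len phrase < 2 then st
      else
        let normalized := PySem.Str.lower phrase
        if PySem.Set.contains st.1 normalized then st
        else (PySem.Set.add st.1 normalized, st.2 ++ [phrase]))
    (PySem.Set.empty, [])).2

def extract_filter_phrase_candidates_py (filters_applied : List String) : List String :=
  dedupe_phrases_py <|
    filters_applied.foldl
      (fun phrases raw_filter =>
        let filter_entry := PySem.Str.strip raw_filter
        if PySem.Str.isIn "=" filter_entry = false then phrases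
        else
          match PySem.Str.splitMax? filter_entry "=" 1 with
          | some (key :: value :: _) =>
            let filter_key := PySem.Str.lower (PySem.Str.strip key)
            let filter_value := PySem.Str.strip value
            if filter_value = "" then phrases
            else
              let phrases := phrases ++ [filter_value]
              if filter_key = "brand" then
                phrases ++ [pvTitle filter_value, PySem.Str.upper filter_value,
                            pvTitle filter_value ++ " 系列", pvTitle filter_value ++ " 的"]
              else if filter_key = "quarter" then
                phrases ++ [filter_value ++ "系列", filter_value ++ "方向", filter_value ++ "结果"]
              else phrases
          | _ => phrases)   -- unreachable: "=" ∈ filter_entry guarantees two parts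
      []

-- ===== PORT B =====
def pv_expansions : PySem.Dict String (List (String → String)) :=
  PySem.Dict.ofList
    [("brand", [fun v => pvTitle v, fun v => PySem.Str.upper v,
                fun v => pvTitle v ++ " 系列", fun v => pvTitle v ++ " 的"]),
     ("quarter", [fun v => v ++ "系列", fun v => v ++ "方向", fun v => v ++ "结果"])]

def extract_filter_phrase_candidates_py_alt (filters_applied : List String) : List String :=
  (filters_applied.foldl
    (fun (st : PySem.Set String × List String) raw_filter =>
      let entry := PySem.Str.strip raw_filter
      if PySem.Str.isIn "=" entry = false then st
      else
        match (PySem.Str.splitMax? entry "=" 1).getD [] with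
        | [] => st
        | [_] => st
        | key :: value :: _ =>
          let value := PySem.Str.strip value
          if value = "" then st
          else
            ((fun v => v) :: PySem.Dict.getD pv_expansions (PySem.Str.lower (PySem.Str.strip key)) []).foldl
              (fun st make =>
                let phrase := PySem.Str.strip (make value)
                if PySem.Str.len phrase < 2 then st
                else
                  let normalized := PySem.Str.lower phrase
                  if PySem.Set.contains st.1 normalized then st
                  else (PySem.Set.add st.1 normalized, st.2 ++ [phrase]))
              st)
    (PySem.Set.empty, [])).2

-- ===== PRECONDITION & SPEC =====
def Spec_extract_filter_phrase_candidates_py (filters_applied : List String) (out : List String) : Prop := out = extract_filter_phrase_candidates_py_alt filters_applied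
instance (filters_applied : List String) (out : List String) : Decidable (Spec_extract_filter_phrase_candidates_py filters_applied out) := by unfold Spec_extract_filter_phrase_candidates_py; infer_instance

-- ===== CLAIM (what is proved, stated in full; the proofs are below) =====
def Claim_equal_extract_filter_phrase_candidates_py : Prop := ∀ (filters_applied : List String), Dom_extract_filter_phrase_candidates_py filters_applied → Spec_extract_filter_phrase_candidates_py filters_applied (extract_filter_phrase_candidates_py filters_applied)

-- ===== LEMMAS AND PROOFS =====

-- the shared dedupe step (proof-only name; both ports' lambdas are definitionally this)
def pvDStep (st : PySem.Set String × List String) (raw : String) : PySem.Set String × List String :=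
  let phrase := PySem.Str.strip raw
  if PySem.Str.len phrase < 2 then st
  else
    let normalized := PySem.Str.lower phrase
    if PySem.Set.contains st.1 normalized then st
    else (PySem.Set.add st.1 normalized, st.2 ++ [phrase])

-- A's per-entry phrase builder (proof-only name)
def pvBodyA (phrases : List String) (raw_filter : String) : List String :=
  let filter_entry := PySem.Str.strip raw_filter
  if PySem.Str.isIn "=" filter_entry = false then phrases
  else
    match PySem.Str.splitMax? filter_entry "=" 1 with
    | some (key :: value :: _) =>
      let filter_key := PySem.Str.lower (PySem.Str.strip key)
      let filter_value := PySem.Str.strip value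
      if filter_value = "" then phrases
      else
        let phrases := phrases ++ [filter_value]
        if filter_key = "brand" then
          phrases ++ [pvTitle filter_value, PySem.Str.upper filter_value,
                      pvTitle filter_value ++ " 系列", pvTitle filter_value ++ " 的"]
        else if filter_key = "quarter" then
          phrases ++ [filter_value ++ "系列", filter_value ++ "方向", filter_value ++ "结果"]
        else phrases
    | _ => phrases

-- B's per-entry fused step (proof-only name)
def pvBodyB (st : PySem.Set String × List String) (raw_filter : String) : PySem.Set String × List String :=
  let entry := PySem.Str.strip raw_filter
  if PySem.Str.isIn "=" entry = false then st
  else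
    match (PySem.Str.splitMax? entry "=" 1).getD [] with
    | [] => st
    | [_] => st
    | key :: value :: _ =>
      let value := PySem.Str.strip value
      if value = "" then st
      else
        ((fun v => v) :: PySem.Dict.getD pv_expansions (PySem.Str.lower (PySem.Str.strip key)) []).foldl
          (fun st make => pvDStep st (make value)) st

theorem pv_expansions_mk : pv_expansions = PySem.Dict.mk
    [("brand", [fun v => pvTitle v, fun v => PySem.Str.upper v,
                fun v => pvTitle v ++ " 系列", fun v => pvTitle v ++ " 的"]),
     ("quarter", [fun v => v ++ "系列", fun v => v ++ "方向", fun v => v ++ "结果"])] := by rfl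

theorem pv_getD_brand : PySem.Dict.getD pv_expansions "brand" [] =
    [fun v => pvTitle v, fun v => PySem.Str.upper v,
     fun v => pvTitle v ++ " 系列", fun v => pvTitle v ++ " 的"] := by
  rw [pv_expansions_mk]; simp [PySem.Dict.getD, PySem.Dict.get?_mk_cons]

theorem pv_getD_quarter : PySem.Dict.getD pv_expansions "quarter" [] =
    [fun v => v ++ "系列", fun v => v ++ "方向", fun v => v ++ "结果"] := by
  rw [pv_expansions_mk]; simp [PySem.Dict.getD, PySem.Dict.get?_mk_cons]

theorem pv_getD_other (k : String) (h1 : k ≠ "brand") (h2 : k ≠ "quarter") :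
    PySem.Dict.getD pv_expansions k [] = [] := by
  rw [pv_expansions_mk]
  simp [PySem.Dict.getD, PySem.Dict.get?, Ne.symm h1, Ne.symm h2]

theorem pvBodyA_prefix (ph : List String) (e : String) :
    pvBodyA ph e = ph ++ pvBodyA [] e := by
  unfold pvBodyA
  dsimp only
  split_ifs with h1
  · simp
  · rcases h : PySem.Str.splitMax? (PySem.Str.strip e) "=" 1 with _ | (_ | ⟨k, _ | ⟨v, rest⟩⟩) <;> dsimp only
    · simp
    · simp
    · simp
    · split_ifs <;> simp

theorem pvBodyB_eq (st : PySem.Set String × List String) (e : String) :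
    pvBodyB st e = List.foldl pvDStep st (pvBodyA [] e) := by
  unfold pvBodyB pvBodyA
  dsimp only
  split_ifs with h1
  · rfl
  · rcases h : PySem.Str.splitMax? (PySem.Str.strip e) "=" 1 with _ | (_ | ⟨k, _ | ⟨v, rest⟩⟩) <;> dsimp only [Option.getD_some, Option.getD_none]
    · rfl
    · rfl
    · rfl
    · split_ifs with h2 hb hq
      · rfl
      · rw [hb, pv_getD_brand]; rfl
      · rw [hq, pv_getD_quarter]; rfl
      · rw [pv_getD_other _ hb hq]; rfl

set_option maxHeartbeats 1000000 in
theorem pvMain (filters : List String) (s : PySem.Set String × List String) (ph : List String) :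
    List.foldl pvDStep s (filters.foldl pvBodyA ph) =
      filters.foldl pvBodyB (List.foldl pvDStep s ph) := by
  induction filters generalizing s ph with
  | nil => rfl
  | cons e rest ih =>
    simp only [List.foldl_cons]
    rw [ih, pvBodyA_prefix, List.foldl_append, ← pvBodyB_eq]

-- ===== VERDICT (by name: the statement is the Claim_ definition above) =====
set_option maxHeartbeats 1000000 in
theorem extract_filter_phrase_candidates_py_spec : Claim_equal_extract_filter_phrase_candidates_py := by
  intro filters _
  show extract_filter_phrase_candidates_py filters = extract_filter_phrase_candidates_py_alt filters
  unfold extract_filter_phrase_candidates_py extract_filter_phrase_candidates_py_alt dedupe_phrases_py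
  have := pvMain filters (PySem.Set.empty, []) []
  simp only [List.foldl_nil] at this
  show (List.foldl pvDStep (PySem.Set.empty, []) (filters.foldl pvBodyA [])).2
      = (filters.foldl pvBodyB (PySem.Set.empty, [])).2
  rw [this]
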